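-- pv_equiv track=rewrite | github.com/alexander-pv/educational_repo | algorithms/python/tasks/10_dots_lines.py | count_segments_simple
-- ===== SOURCE A (Python) =====
-- def count_segments_simple(starts: list, ends: list, value: int) -> int:
--     """
--     Count segments which covers a passed value
--     :param starts: list
--     :param ends:   list
--     :param value:  value
--     :return: int
--     """
--
--     acc = 0
--
--     for left, right in zip(starts, ends):
--
--         if left <= value and right < value:
--             pass
--         elif left <= value <= right:
--             acc += 1
--         else:
--             break
--     return acc
-- ===== SOURCE B (Python) =====
-- def count_segments_simple(starts: list, ends: list, value: int) -> int:
--     pairs = list(zip(starts, ends))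
--     n = 0
--     while n < len(pairs) and pairs[n][0] <= value:
--         n += 1
--     return sum(1 for l, r in pairs[:n] if r >= value)
-- ===== Notes on version B (the rewrite author's own statement) =====
-- stated objective: simpler
-- what changed: Replaces the single three-branch break-loop with a truncation step (find the first start > value) followed by a plain count of ends >= value over that prefix.
import Mathlib
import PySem

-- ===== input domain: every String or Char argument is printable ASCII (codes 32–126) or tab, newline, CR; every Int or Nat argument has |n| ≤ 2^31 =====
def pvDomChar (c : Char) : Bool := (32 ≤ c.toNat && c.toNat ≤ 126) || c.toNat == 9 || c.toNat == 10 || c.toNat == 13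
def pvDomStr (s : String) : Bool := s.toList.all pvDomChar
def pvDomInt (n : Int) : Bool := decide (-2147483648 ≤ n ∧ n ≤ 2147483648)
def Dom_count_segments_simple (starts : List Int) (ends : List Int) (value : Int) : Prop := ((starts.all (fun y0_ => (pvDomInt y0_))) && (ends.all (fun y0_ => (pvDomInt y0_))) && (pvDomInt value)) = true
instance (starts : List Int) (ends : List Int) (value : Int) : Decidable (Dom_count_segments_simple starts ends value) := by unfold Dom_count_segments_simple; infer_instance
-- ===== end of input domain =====

-- B: same O(n) cost; decomposes A's three-branch break-loop into a prefix-truncation step plus a plain count (objective: simpler).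
-- ===== PORT A =====
-- the for-loop with break, over zip(starts, ends), carrying acc
def csLoopA (pairs : List (Int × Int)) (value : Int) (acc : Int) : Int :=
  match pairs with
  | [] => acc
  | (left, right) :: rest =>
      if left ≤ value ∧ right < value then csLoopA rest value acc
      else if left ≤ value ∧ value ≤ right then csLoopA rest value (acc + 1)
      else acc

def count_segments_simple (starts : List Int) (ends : List Int) (value : Int) : Int :=
  csLoopA (starts.zip ends) value 0

-- ===== PORT B =====
-- the while-loop advancing n while pairs[n][0] <= value (recursion on the list plays the index)
def csPrefixLen (pairs : List (Int × Int)) (value : Int) : Nat :=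
  match pairs with
  | [] => 0
  | p :: rest => if p.1 ≤ value then csPrefixLen rest value + 1 else 0

def count_segments_simple_alt (starts : List Int) (ends : List Int) (value : Int) : Int :=
  let pairs := starts.zip ends
  let n := csPrefixLen pairs value
  ((pairs.take n).countP (fun p => value ≤ p.2) : Int)

-- ===== PRECONDITION & SPEC =====
def Spec_count_segments_simple (starts : List Int) (ends : List Int) (value : Int) (out : Int) : Prop := out = count_segments_simple_alt starts ends value
instance (starts : List Int) (ends : List Int) (value : Int) (out : Int) : Decidable (Spec_count_segments_simple starts ends value out) := by unfold Spec_count_segments_simple; infer_instance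

-- ===== CLAIM (what is proved, stated in full; the proofs are below) =====
def Claim_equal_count_segments_simple : Prop := ∀ (starts : List Int) (ends : List Int) (value : Int), Dom_count_segments_simple starts ends value → Spec_count_segments_simple starts ends value (count_segments_simple starts ends value)

-- ===== LEMMAS AND PROOFS =====

-- ===== VERDICT (by name: the statement is the Claim_ definition above) =====
-- key invariant: the break-loop equals acc + the count over the <=value-start prefix
theorem csLoopA_eq (pairs : List (Int × Int)) (value : Int) (acc : Int) :
    csLoopA pairs value acc =
      acc + ((pairs.take (csPrefixLen pairs value)).countP (fun p => value ≤ p.2) : Int) := by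
  induction pairs generalizing acc with
  | nil => simp [csLoopA, csPrefixLen]
  | cons p rest ih =>
    obtain ⟨l, r⟩ := p
    by_cases hl : l ≤ value
    · by_cases hr : value ≤ r
      · have hr' : ¬ r < value := not_lt.mpr hr
        simp [csLoopA, csPrefixLen, hl, hr, hr', ih]
        omega
      · have hr' : r < value := lt_of_not_ge hr
        simp [csLoopA, csPrefixLen, hl, hr, hr', ih]
    · simp [csLoopA, csPrefixLen, hl]

theorem count_segments_simple_spec : Claim_equal_count_segments_simple := by
  intro starts ends value _
  unfold Spec_count_segments_simple count_segments_simple count_segments_simple_alt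
  simpa using csLoopA_eq (starts.zip ends) value 0
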